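-- pv_equiv track=rewrite | github.com/flalix/perturb_agent | src/libs/Basic.py | break_line_per_length
-- ===== SOURCE A (Python) =====
-- def break_line_per_length(stri:str, split_char:str=' ', sep:str='<br>', maxLen:int=30) -> str:
-- 	mat = stri.split(split_char)
-- 	text = ''; temp=''
-- 	insert_break = False
-- 	for term in mat:
-- 		if insert_break:
-- 			text += sep + term
-- 			insert_break = False
-- 		else:
-- 			text += term
--
-- 		temp += term
--
-- 		if len(temp) > maxLen:
-- 			temp = ''
-- 			insert_break = True
-- 		else:
-- 			text += ' '
--
-- 	return text.strip()
-- ===== SOURCE B (Python) =====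
-- def break_line_per_length(stri: str, split_char: str = ' ', sep: str = '<br>', maxLen: int = 30) -> str:
--     lines = []
--     cur = []
--     n = 0
--     for word in stri.split(split_char):
--         cur.append(word)
--         n += len(word)
--         if n > maxLen:
--             lines.append(cur)
--             cur = []
--             n = 0
--     if cur:
--         lines.append(cur)
--     return sep.join(' '.join(line) for line in lines).strip()
-- ===== Notes on version B (the rewrite author's own statement) =====
-- stated objective: simpler
-- what changed: Replaces A's delayed insert_break flag and incremental string concatenation with an explicit list-of-lines grouping (running sum of word lengths) followed by a two-level join.
import Mathlib
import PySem

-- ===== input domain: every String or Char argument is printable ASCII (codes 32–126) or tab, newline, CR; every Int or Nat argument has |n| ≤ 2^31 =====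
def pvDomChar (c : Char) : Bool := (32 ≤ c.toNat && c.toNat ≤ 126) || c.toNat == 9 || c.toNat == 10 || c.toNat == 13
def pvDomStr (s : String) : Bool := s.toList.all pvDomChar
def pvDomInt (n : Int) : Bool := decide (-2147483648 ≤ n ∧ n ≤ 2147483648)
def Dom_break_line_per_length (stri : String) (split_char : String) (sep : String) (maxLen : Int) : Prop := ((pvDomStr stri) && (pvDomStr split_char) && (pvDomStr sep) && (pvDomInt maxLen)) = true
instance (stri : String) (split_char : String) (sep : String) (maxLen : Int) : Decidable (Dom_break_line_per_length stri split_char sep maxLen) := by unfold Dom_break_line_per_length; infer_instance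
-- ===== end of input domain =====

-- B replaces A's delayed insert_break flag and incremental concatenation with an explicit
-- list-of-lines grouping followed by a two-level join (objective: simpler).

-- ===== PORT A =====
-- A's loop state: (text, temp, insert_break); faithful step-for-step transliteration on List Char.
def blplStepA (sep : List Char) (maxLen : Int) (s : List Char × List Char × Bool) (term : List Char) :
    List Char × List Char × Bool :=
  let text := if s.2.2 then s.1 ++ sep ++ term else s.1 ++ term
  let temp := s.2.1 ++ term
  if (temp.length : Int) > maxLen then (text, [], true)
  else (text ++ [' '], temp, false)

def break_line_per_length (stri : String) (split_char : String) (sep : String) (maxLen : Int) : String :=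
  -- stri.split(split_char): raises ValueError for an empty separator (split? = none); excluded by Pre_.
  let mat := (PySem.Chars.split? stri.toList split_char.toList).getD []
  let st := mat.foldl (blplStepA sep.toList maxLen) ([], [], false)
  String.mk (PySem.Chars.strip st.1)

-- ===== PORT B =====
-- B's loop state: (lines, cur, n); close the current line whenever the running sum exceeds maxLen.
def blplStepB (maxLen : Int) (s : List (List (List Char)) × List (List Char) × Int) (word : List Char) :
    List (List (List Char)) × List (List Char) × Int :=
  let cur := s.2.1 ++ [word]
  let n := s.2.2 + (word.length : Int)
  if n > maxLen then (s.1 ++ [cur], [], 0) else (s.1, cur, n)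

def break_line_per_length_alt (stri : String) (split_char : String) (sep : String) (maxLen : Int) : String :=
  let mat := (PySem.Chars.split? stri.toList split_char.toList).getD []
  let st := mat.foldl (blplStepB maxLen) ([], [], 0)
  let lines := if st.2.1 ≠ [] then st.1 ++ [st.2.1] else st.1
  String.mk (PySem.Chars.strip
    (PySem.Chars.join sep.toList (lines.map (PySem.Chars.join [' ']))))

-- ===== PRECONDITION & SPEC =====
-- Pre_ excludes only the empty separator, where Python's str.split raises ValueError (in A and in B alike).
def Pre_break_line_per_length (stri : String) (split_char : String) (sep : String) (maxLen : Int) : Prop :=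
  split_char ≠ ""
instance (stri : String) (split_char : String) (sep : String) (maxLen : Int) : Decidable (Pre_break_line_per_length stri split_char sep maxLen) := by unfold Pre_break_line_per_length; infer_instance

def pvWitness_break_line_per_length : String × String × String × Int :=
  ("the quick brown fox jumps over", " ", "<br>", 9)

def Spec_break_line_per_length (stri : String) (split_char : String) (sep : String) (maxLen : Int) (out : String) : Prop := out = break_line_per_length_alt stri split_char sep maxLen
instance (stri : String) (split_char : String) (sep : String) (maxLen : Int) (out : String) : Decidable (Spec_break_line_per_length stri split_char sep maxLen out) := by unfold Spec_break_line_per_length; infer_instance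

-- ===== CLAIM (what is proved, stated in full; the proofs are below) =====
def Claim_equal_break_line_per_length : Prop := ∀ (stri : String) (split_char : String) (sep : String) (maxLen : Int), Dom_break_line_per_length stri split_char sep maxLen → Pre_break_line_per_length stri split_char sep maxLen → Spec_break_line_per_length stri split_char sep maxLen (break_line_per_length stri split_char sep maxLen)

-- ===== LEMMAS AND PROOFS =====

-- rendering of B's list of lines
def blplS (sep : List Char) (lines : List (List (List Char))) : List Char :=
  PySem.Chars.join sep (lines.map (PySem.Chars.join [' ']))

theorem blpl_join_append_singleton (s y : List Char) (xs : List (List Char)) (h : xs ≠ []) :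
    PySem.Chars.join s (xs ++ [y]) = PySem.Chars.join s xs ++ s ++ y := by
  induction xs with
  | nil => simp at h
  | cons a t ih =>
    cases t with
    | nil => simp [PySem.Chars.join, List.intercalate]
    | cons b u =>
      have := ih (by simp)
      simp [PySem.Chars.join, List.intercalate] at this ⊢
      simp [List.flatten, List.intersperse] at this ⊢
      simp [this]

theorem blpl_join_snoc_extend (s z y : List Char) (xs : List (List Char)) :
    PySem.Chars.join s (xs ++ [y]) ++ z = PySem.Chars.join s (xs ++ [y ++ z]) := by
  induction xs with
  | nil => simp [PySem.Chars.join, List.intercalate]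
  | cons a t ih =>
    cases t with
    | nil => simp [PySem.Chars.join, List.intercalate]
    | cons b u =>
      simp [PySem.Chars.join, List.intercalate, List.intersperse] at ih ⊢
      simp [ih]

theorem blpl_strip_space (x : List Char) :
    PySem.Chars.strip (x ++ [' ']) = PySem.Chars.strip x := by
  unfold PySem.Chars.strip PySem.Chars.lstrip PySem.Chars.rstrip
  rw [List.dropWhile_append]
  by_cases h : (List.dropWhile PySem.Chars.isspace x).isEmpty
  · simp [List.isEmpty_iff.mp h, PySem.Chars.isspace]
  · simp only [h]
    simp [PySem.Chars.isspace]

-- the loop invariant: run both folds from related states, the stripped results agree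
theorem blpl_loop (sep : List Char) (maxLen : Int) (mat : List (List Char)) :
    ∀ (text temp : List Char) (br : Bool) (lines : List (List (List Char)))
      (cur : List (List Char)) (n : Int),
      temp = cur.flatten → n = (cur.flatten.length : Int) →
      (if br then cur = [] ∧ lines ≠ [] ∧ text = blplS sep lines
       else (lines = [] ∧ cur = [] ∧ text = []) ∨
            (cur ≠ [] ∧ text = blplS sep (lines ++ [cur]) ++ [' '])) →
      PySem.Chars.strip (mat.foldl (blplStepA sep maxLen) (text, temp, br)).1 =
      PySem.Chars.strip (blplS sep
        (let st := mat.foldl (blplStepB maxLen) (lines, cur, n)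
         if st.2.1 ≠ [] then st.1 ++ [st.2.1] else st.1)) := by
  induction mat with
  | nil =>
    intro text temp br lines cur n htemp hn hrel
    simp only [List.foldl_nil]
    cases br with
    | true =>
      obtain ⟨hc, _, ht⟩ := hrel
      simp [hc, ht]
    | false =>
      rcases hrel with ⟨hl, hc, ht⟩ | ⟨hc, ht⟩
      · simp [hl, hc, ht, blplS, PySem.Chars.join, List.intercalate]
      · simp only [hc, if_pos, ht, ne_eq, not_false_iff]
        simp [blpl_strip_space]
  | cons w rest ih =>
    intro text temp br lines cur n htemp hn hrel
    simp only [List.foldl_cons]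
    have hbigIff : (((temp ++ w).length : Int) > maxLen) ↔ (n + (w.length : Int) > maxLen) := by
      subst htemp; subst hn
      simp only [List.length_append]
      push_cast
      omega
    by_cases hbig : ((temp ++ w).length : Int) > maxLen
    · -- break triggered in both programs
      have hbig' := hbigIff.mp hbig
      have hB : blplStepB maxLen (lines, cur, n) w = (lines ++ [cur ++ [w]], [], 0) := by
        simp only [blplStepB]
        rw [if_pos hbig']
      cases br with
      | true =>
        try simp only [reduceIte] at hrel
        obtain ⟨hc, hne, ht⟩ := hrel
        have hA : blplStepA sep maxLen (text, temp, true) w = (text ++ sep ++ w, [], true) := by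
          simp only [blplStepA, if_true]
          rw [if_pos (by simpa using hbig)]
        rw [hA, hB]
        apply ih
        · rfl
        · simp
        · try simp only [reduceIte]
          refine ⟨by simp, by simp, ?_⟩
          subst hc
          rw [blplS, List.map_append, List.map_singleton,
              blpl_join_append_singleton _ _ _ (by simpa using hne)]
          simp [ht, blplS, PySem.Chars.join, List.intercalate]
      | false =>
        try simp only [reduceIte] at hrel
        have hA : blplStepA sep maxLen (text, temp, false) w = (text ++ w, [], true) := by
          simp only [blplStepA, Bool.false_eq_true, if_false]
          rw [if_pos (by simpa using hbig)]
        rw [hA, hB]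
        apply ih
        · rfl
        · simp
        · try simp only [reduceIte]
          refine ⟨by simp, by simp, ?_⟩
          rcases hrel with ⟨hl, hc, ht⟩ | ⟨hc, ht⟩
          · subst hl; subst hc
            simp [ht, blplS, PySem.Chars.join, List.intercalate]
          · rw [ht]
            have h1 : PySem.Chars.join [' '] (cur ++ [w]) =
                PySem.Chars.join [' '] cur ++ [' '] ++ w :=
              blpl_join_append_singleton [' '] w cur hc
            rw [blplS, blplS, List.map_append, List.map_append,
                List.map_singleton, List.map_singleton, h1]
            rw [List.append_assoc (PySem.Chars.join [' '] cur) [' '] w,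
                List.append_assoc _ [' '] w]
            exact blpl_join_snoc_extend sep ([' '] ++ w) (PySem.Chars.join [' '] cur)
              (lines.map (PySem.Chars.join [' ']))
    · -- no break
      have hsmall : ¬ n + (w.length : Int) > maxLen := fun h => hbig (hbigIff.mpr h)
      have hB : blplStepB maxLen (lines, cur, n) w = (lines, cur ++ [w], n + (w.length : Int)) := by
        simp only [blplStepB]
        rw [if_neg hsmall]
      have hn' : n + (w.length : Int) = ((cur ++ [w]).flatten.length : Int) := by
        subst hn; simp
      cases br with
      | true =>
        try simp only [reduceIte] at hrel
        obtain ⟨hc, hne, ht⟩ := hrel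
        have hA : blplStepA sep maxLen (text, temp, true) w =
            (text ++ sep ++ w ++ [' '], temp ++ w, false) := by
          simp only [blplStepA, if_true]
          rw [if_neg (by simpa using hbig)]
        rw [hA, hB]
        apply ih
        · simp [htemp]
        · exact hn'
        · try simp only [reduceIte]
          refine Or.inr ⟨by simp, ?_⟩
          subst hc
          rw [ht, blplS, blplS, List.map_append, List.map_singleton,
              blpl_join_append_singleton _ _ _ (by simpa using hne)]
          simp [PySem.Chars.join, List.intercalate]
      | false =>
        try simp only [reduceIte] at hrel
        have hA : blplStepA sep maxLen (text, temp, false) w =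
            (text ++ w ++ [' '], temp ++ w, false) := by
          simp only [blplStepA, Bool.false_eq_true, if_false]
          rw [if_neg (by simpa using hbig)]
        rw [hA, hB]
        apply ih
        · simp [htemp]
        · exact hn'
        · try simp only [reduceIte]
          refine Or.inr ⟨by simp, ?_⟩
          rcases hrel with ⟨hl, hc, ht⟩ | ⟨hc, ht⟩
          · subst hl; subst hc
            simp [ht, blplS, PySem.Chars.join, List.intercalate]
          · rw [ht]
            have h1 : PySem.Chars.join [' '] (cur ++ [w]) =
                PySem.Chars.join [' '] cur ++ [' '] ++ w :=
              blpl_join_append_singleton [' '] w cur hc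
            rw [blplS, blplS, List.map_append, List.map_append,
                List.map_singleton, List.map_singleton, h1]
            congr 1
            rw [List.append_assoc (PySem.Chars.join [' '] cur) [' '] w,
                List.append_assoc _ [' '] w]
            exact blpl_join_snoc_extend sep ([' '] ++ w) (PySem.Chars.join [' '] cur)
              (lines.map (PySem.Chars.join [' ']))

-- ===== VERDICT (by name: the statement is the Claim_ definition above) =====
theorem break_line_per_length_spec : Claim_equal_break_line_per_length := by
  intro stri split_char sep maxLen _ _
  unfold Spec_break_line_per_length break_line_per_length break_line_per_length_alt
  simp only []
  congr 1
  exact blpl_loop sep.toList maxLen _ [] [] false [] [] 0 rfl rfl (Or.inl ⟨rfl, rfl, rfl⟩)
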